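-- pv_equiv track=rewrite | github.com/JamesBradleyBigCreative/Classroom_Exercises | Haitham Mohammed/Team_Project/Team_Project.py | encrypt_fibonacci
-- ===== SOURCE A (Python) =====
-- def encrypt_fibonacci(password):
--
--             ans = ""
--             n= 0
--             # iterate over the given text
--             for i in range(len(password)):
--                 n = n+i
--                 ch = password[i]
--
--                 # check if space is there then simply add space
--                 if ch==" ":
--                     ans+=" "
--                 # check if a character is uppercase then encrypt it accordingly
--                 elif (ch.isupper()):
--                     ans += chr((ord(ch) + n-65) % 26 + 65)
--                 # check if a character is lowercase then encrypt it accordingly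
--
--                 else:
--                     ans += chr((ord(ch) + n-97) % 26 + 97)
--
--             return ans
-- ===== SOURCE B (Python) =====
-- # Table-driven version: the triangular shift tri(i) mod 26 is periodic in i with
-- # period 52, so precompute that cycle once and pick each encrypted letter out of
-- # a fixed alphabet string instead of doing chr/ord arithmetic per character.
-- _SHIFTS = [(i * (i + 1) // 2) % 26 for i in range(52)]
-- _UP = "ABCDEFGHIJKLMNOPQRSTUVWXYZ"
-- _LOW = "abcdefghijklmnopqrstuvwxyz"
--
-- def encrypt_fibonacci(password):
--     out = []
--     for i, ch in enumerate(password):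
--         s = _SHIFTS[i % 52]
--         if ch == " ":
--             out.append(" ")
--         elif ch.isupper():
--             out.append(_UP[(ord(ch) - 65 + s) % 26])
--         else:
--             out.append(_LOW[(ord(ch) - 97 + s) % 26])
--     return "".join(out)
-- ===== Notes on version B (the rewrite author's own statement) =====
-- stated objective: alternative
-- what changed: Replaces A's running-sum accumulator and per-character chr/ord modular arithmetic by a table-driven scheme: a precomputed 52-entry cycle of shifts (tri(i) mod 26 is periodic with period 52) indexed by i % 52, and encrypted letters looked up by index in fixed alphabet strings; output built as a joined list instead of repeated string concatenation.
import Mathlib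
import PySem

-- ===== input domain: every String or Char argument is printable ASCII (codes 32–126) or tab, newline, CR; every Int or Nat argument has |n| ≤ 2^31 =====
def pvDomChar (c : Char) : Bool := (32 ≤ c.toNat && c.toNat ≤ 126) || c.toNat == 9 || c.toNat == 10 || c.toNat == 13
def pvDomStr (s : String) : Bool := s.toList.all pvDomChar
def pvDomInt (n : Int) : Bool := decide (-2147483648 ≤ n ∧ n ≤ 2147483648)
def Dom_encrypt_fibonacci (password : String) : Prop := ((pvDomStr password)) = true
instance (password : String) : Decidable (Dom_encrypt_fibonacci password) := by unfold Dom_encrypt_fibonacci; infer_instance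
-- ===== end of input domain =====

-- B replaces A's running-sum accumulator and chr/ord arithmetic by a precomputed 52-entry shift cycle (tri(i) mod 26 is periodic) and alphabet-string lookups (objective: alternative, same cost).

-- ===== PORT A =====
-- one loop iteration of A: n = n + i; ch = password[i]; the three branches append to ans
def pvStepA (cs : List Char) (st : List Char × Int) (i : Int) : List Char × Int :=
  let n := st.2 + i
  let ch := PySem.List.pyGetD cs i ' '
  let ans :=
    if ch = ' ' then st.1 ++ [' ']
    else if PySem.Chars.isupper ch then
      st.1 ++ [Char.ofNat ((PySem.Int.mod ((ch.toNat : Int) + n - 65) 26 + 65).toNat)]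
    else
      st.1 ++ [Char.ofNat ((PySem.Int.mod ((ch.toNat : Int) + n - 97) 26 + 97).toNat)]
  (ans, n)

def encrypt_fibonacci (password : String) : String :=
  String.mk
    (((PySem.List.pyRange 0 (PySem.List.len password.toList) 1).foldl
        (pvStepA password.toList) ([], 0)).1)

-- ===== PORT B =====
-- module-level tables of Source B: _SHIFTS = [(i*(i+1)//2) % 26 for i in range(52)], _UP, _LOW
def pvShifts : List Int :=
  (PySem.List.pyRange 0 52 1).map
    (fun i => PySem.Int.mod (PySem.Int.floordiv (i * (i + 1)) 2) 26)
def pvUp : List Char := "ABCDEFGHIJKLMNOPQRSTUVWXYZ".toList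
def pvLow : List Char := "abcdefghijklmnopqrstuvwxyz".toList

-- Source B's loop body: s = _SHIFTS[i % 52]; three branches pick from the tables
def pvEncCharB (i : Int) (ch : Char) : Char :=
  let s := PySem.List.pyGetD pvShifts (PySem.Int.mod i 52) 0
  if ch = ' ' then ' '
  else if PySem.Chars.isupper ch then
    PySem.List.pyGetD pvUp (PySem.Int.mod ((ch.toNat : Int) - 65 + s) 26) ' '
  else
    PySem.List.pyGetD pvLow (PySem.Int.mod ((ch.toNat : Int) - 97 + s) 26) ' '

def encrypt_fibonacci_alt (password : String) : String :=
  String.mk ((PySem.List.enumerate password.toList).map (fun p => pvEncCharB p.1 p.2))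

-- ===== PRECONDITION & SPEC =====
def Spec_encrypt_fibonacci (password : String) (out : String) : Prop := out = encrypt_fibonacci_alt password
instance (password : String) (out : String) : Decidable (Spec_encrypt_fibonacci password out) := by unfold Spec_encrypt_fibonacci; infer_instance

-- ===== CLAIM (what is proved, stated in full; the proofs are below) =====
def Claim_equal_encrypt_fibonacci : Prop := ∀ (password : String), Dom_encrypt_fibonacci password → Spec_encrypt_fibonacci password (encrypt_fibonacci password)

-- ===== LEMMAS AND PROOFS =====

-- proof-side helper: the character A produces at index i (closed-form triangular shift)
def pvEncChar (i : Int) (ch : Char) : Char :=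
  let n := PySem.Int.floordiv (i * (i + 1)) 2
  if ch = ' ' then ' '
  else if PySem.Chars.isupper ch then
    Char.ofNat ((PySem.Int.mod ((ch.toNat : Int) + n - 65) 26 + 65).toNat)
  else
    Char.ofNat ((PySem.Int.mod ((ch.toNat : Int) + n - 97) 26 + 97).toNat)

-- the accumulator's value BEFORE iteration i: sum of 0..i-1 = i*(i+1)/2 - i
def pvTriBefore (i : Int) : Int := PySem.Int.floordiv (i * (i + 1)) 2 - i

lemma pvTriBefore_step (a : Int) :
    pvTriBefore a + a = pvTriBefore (a + 1) := by
  unfold pvTriBefore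
  rw [PySem.Int.floordiv_eq_ediv_of_pos (by omega), PySem.Int.floordiv_eq_ediv_of_pos (by omega)]
  have h1 : (2 : Int) ∣ a * (a + 1) := Int.even_mul_succ_self a |>.two_dvd
  have h2 : (2 : Int) ∣ (a + 1) * (a + 1 + 1) := Int.even_mul_succ_self (a + 1) |>.two_dvd
  have h3 : (a + 1) * (a + 1 + 1) = a * (a + 1) + 2 * (a + 1) := by ring
  have e1 := Int.ediv_mul_cancel h1
  have e2 := Int.ediv_mul_cancel h2
  omega

-- loop invariant: folding A's step over [a, a+k) starting with accumulator pvTriBefore a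
-- produces, appended to acc, exactly the closed-form per-index characters
lemma pvLoop_inv (cs : List Char) (k : Nat) : ∀ (a : Int) (acc : List Char),
    ((PySem.List.pyRange a (a + k) 1).foldl (pvStepA cs) (acc, pvTriBefore a)).1
      = acc ++ (PySem.List.pyRange a (a + k) 1).map
          (fun j => pvEncChar j (PySem.List.pyGetD cs j ' ')) := by
  induction k with
  | zero =>
      intro a acc
      rw [PySem.List.pyRange_one_eq_nil (by omega)]
      simp
  | succ k ih =>
      intro a acc
      rw [PySem.List.pyRange_one_cons (by omega : a < a + (k + 1 : Nat))]
      have hstep : pvStepA cs (acc, pvTriBefore a) a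
          = (acc ++ [pvEncChar a (PySem.List.pyGetD cs a ' ')], pvTriBefore (a + 1)) := by
        have hfd : PySem.Int.floordiv (a * (a + 1)) 2 = pvTriBefore a + a := by
          unfold pvTriBefore; ring
        have hn' : pvTriBefore a + a = pvTriBefore (a + 1) := by
          exact pvTriBefore_step a
        simp only [pvStepA, pvEncChar, hfd]
        rw [hn']
        split_ifs <;> rfl
      have h2 : a + (k + 1 : Nat) = (a + 1) + (k : Nat) := by push_cast; ring
      rw [List.foldl_cons, hstep, h2, ih (a + 1) _]
      simp

-- triangular numbers mod 26: tri(i) ≡ tri(i % 52) (mod 26)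
lemma pvTri_mod_period (i : Int) (h : 0 ≤ i) :
    PySem.Int.floordiv (i * (i + 1)) 2 % 26
      = PySem.Int.floordiv ((i % 52) * (i % 52 + 1)) 2 % 26 := by
  set r := i % 52 with hr
  have hq : i - r = 52 * (i / 52) := by
    have := Int.ediv_add_emod i 52; omega
  rw [PySem.Int.floordiv_eq_ediv_of_pos (by omega : (0:Int) < 2),
      PySem.Int.floordiv_eq_ediv_of_pos (by omega : (0:Int) < 2)]
  have h1 : (2 : Int) ∣ i * (i + 1) := Int.even_mul_succ_self i |>.two_dvd
  have h2 : (2 : Int) ∣ r * (r + 1) := Int.even_mul_succ_self r |>.two_dvd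
  have e1 := Int.ediv_mul_cancel h1
  have e2 := Int.ediv_mul_cancel h2
  have hdvd : (26 : Int) ∣ (i * (i + 1) / 2 - r * (r + 1) / 2) := by
    refine ⟨(i / 52) * (i + r + 1), ?_⟩
    have hthis : i * (i + 1) - r * (r + 1) = (i - r) * (i + r + 1) := by ring
    have hp : (i - r) * (i + r + 1) = 2 * (26 * (i / 52 * (i + r + 1))) := by
      rw [hq]; ring
    linarith [e1, e2, hthis, hp]
  omega

-- evaluating the table lookups: pvUp/pvLow at k ∈ [0,26) is the k-th letter
lemma pvUp_get (k : Int) (h0 : 0 ≤ k) (h1 : k < 26) :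
    PySem.List.pyGetD pvUp k ' ' = Char.ofNat (k.toNat + 65) := by
  interval_cases k <;> decide

lemma pvLow_get (k : Int) (h0 : 0 ≤ k) (h1 : k < 26) :
    PySem.List.pyGetD pvLow k ' ' = Char.ofNat (k.toNat + 97) := by
  interval_cases k <;> decide

-- B's table-driven character equals the closed-form character, for nonnegative index
lemma pvEncCharB_eq (i : Int) (hi : 0 ≤ i) (ch : Char) :
    pvEncCharB i ch = pvEncChar i ch := by
  unfold pvEncCharB pvEncChar pvShifts
  have hm : PySem.Int.mod i 52 = i % 52 := PySem.Int.mod_eq_emod_of_pos (by omega)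
  have hr0 : 0 ≤ i % 52 := Int.emod_nonneg i (by omega)
  have hr1 : i % 52 < 52 := Int.emod_lt_of_pos i (by omega)
  rw [hm, PySem.List.pyGetD_map_pyRange_of_nonneg _ _ _ _ hr0 (by omega)]
  have h26 : ∀ a : Int, PySem.Int.mod a 26 = a % 26 := fun a =>
    PySem.Int.mod_eq_emod_of_pos (by omega)
  simp only [h26]
  have hcong : PySem.Int.floordiv (i * (i + 1)) 2 % 26
      = PySem.Int.floordiv ((i % 52) * (i % 52 + 1)) 2 % 26 % 26 := by
    rw [Int.emod_emod_of_dvd _ (dvd_refl 26)]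
    exact pvTri_mod_period i hi
  generalize hN : PySem.Int.floordiv (i * (i + 1)) 2 = n at hcong ⊢
  generalize hS : PySem.Int.floordiv ((i % 52) * (i % 52 + 1)) 2 % 26 = s at hcong ⊢
  split_ifs with hsp hup
  · rfl
  · have hidx0 : 0 ≤ ((ch.toNat : Int) - 65 + s) % 26 := Int.emod_nonneg _ (by omega)
    have hidx1 : ((ch.toNat : Int) - 65 + s) % 26 < 26 := Int.emod_lt_of_pos _ (by omega)
    rw [pvUp_get _ hidx0 hidx1]
    congr 1
    omega
  · have hidx0 : 0 ≤ ((ch.toNat : Int) - 97 + s) % 26 := Int.emod_nonneg _ (by omega)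
    have hidx1 : ((ch.toNat : Int) - 97 + s) % 26 < 26 := Int.emod_lt_of_pos _ (by omega)
    rw [pvLow_get _ hidx0 hidx1]
    congr 1
    omega

theorem pv_main (password : String) :
    encrypt_fibonacci password = encrypt_fibonacci_alt password := by
  unfold encrypt_fibonacci encrypt_fibonacci_alt
  rw [PySem.List.enumerate_eq_map_pyRange password.toList ' ', List.map_map]
  have h0 : (0 : Int) + (password.toList.length : Nat) = PySem.List.len password.toList := by
    simp [PySem.List.len_eq]
  have hinv := pvLoop_inv password.toList password.toList.length 0 []
  rw [h0] at hinv
  have htri : pvTriBefore 0 = 0 := by decide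
  rw [htri] at hinv
  rw [hinv]
  congr 1
  apply List.map_congr_left
  intro j hj
  have hjnn : 0 ≤ j := (PySem.List.mem_pyRange_one.mp hj).1
  simp only [Function.comp]
  rw [pvEncCharB_eq j hjnn]

-- ===== VERDICT (by name: the statement is the Claim_ definition above) =====
theorem encrypt_fibonacci_spec : Claim_equal_encrypt_fibonacci := by
  intro password _
  unfold Spec_encrypt_fibonacci
  exact pv_main password
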